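-- pv_equiv track=rewrite | github.com/sooftware/kospeech | preprocess/functional.py | bracket_filter
-- ===== SOURCE A (Python) =====
-- def bracket_filter(sentence, mode):
--     new_sentence = str()
--
--     if mode == 'phonetic':
--         flag = False
--
--         for ch in sentence:
--             if ch == '(' and flag is False:
--                 flag = True
--                 continue
--             if ch == '(' and flag is True:
--                 flag = False
--                 continue
--             if ch != ')' and flag is False:
--                 new_sentence += ch
--
--     elif mode == 'numeric':
--         update = True
--
--         for ch in sentence:
--             if ch == '(':
--                 continue
--             if ch == ')':
--                 if update is True:
--                     update = False
--                     continue
--                 else: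
--                     update = True
--                     continue
--             if ch != ')' and update is True:
--                 new_sentence += ch
--
--     return new_sentence
-- ===== SOURCE B (Python) =====
-- def bracket_filter(sentence, mode):
--     if mode == 'phonetic':
--         drop, sep = ')', '('
--     elif mode == 'numeric':
--         drop, sep = '(', ')'
--     else:
--         return ''
--     cleaned = ''.join(c for c in sentence if c != drop)
--     parts = cleaned.split(sep)
--     return ''.join(p for i, p in enumerate(parts) if i % 2 == 0)
-- ===== Notes on version B (the rewrite author's own statement) =====
-- stated objective: simpler
-- what changed: Replaced A's char-by-char flag/update state machine with a split-based pipeline: remove the ignored bracket character, split on the toggling bracket character, and join the even-indexed segments.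
import Mathlib
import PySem

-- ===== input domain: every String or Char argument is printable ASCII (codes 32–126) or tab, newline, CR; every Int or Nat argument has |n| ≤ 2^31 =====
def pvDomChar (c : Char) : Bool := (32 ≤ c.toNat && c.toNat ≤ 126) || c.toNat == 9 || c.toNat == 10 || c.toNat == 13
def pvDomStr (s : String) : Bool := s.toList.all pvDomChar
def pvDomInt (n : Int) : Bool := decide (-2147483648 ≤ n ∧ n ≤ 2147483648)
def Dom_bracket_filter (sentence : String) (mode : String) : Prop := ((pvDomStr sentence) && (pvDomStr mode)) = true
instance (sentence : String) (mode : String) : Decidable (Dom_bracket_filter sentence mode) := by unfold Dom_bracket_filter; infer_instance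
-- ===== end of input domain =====

-- B replaces A's char-by-char flag/update state machine by "remove the ignored bracket char,
-- split on the toggling bracket char, keep the even-indexed segments" (objective: simpler).

-- ===== PORT A =====
-- loop body of the phonetic branch (flag toggles on '(', chars kept while flag is False)
def pvStepPhon (st : List Char × Bool) (ch : Char) : List Char × Bool :=
  if ch == '(' && st.2 == false then (st.1, true)
  else if ch == '(' && st.2 == true then (st.1, false)
  else if ch != ')' && st.2 == false then (st.1 ++ [ch], st.2)
  else st

-- loop body of the numeric branch ('(' skipped, ')' toggles update, chars kept while update is True)
def pvStepNum (st : List Char × Bool) (ch : Char) : List Char × Bool :=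
  if ch == '(' then st
  else if ch == ')' then (if st.2 == true then (st.1, false) else (st.1, true))
  else if ch != ')' && st.2 == true then (st.1 ++ [ch], st.2)
  else st

def bracket_filter (sentence : String) (mode : String) : String :=
  if mode == "phonetic" then
    String.mk (sentence.toList.foldl pvStepPhon (([] : List Char), false)).1
  else if mode == "numeric" then
    String.mk (sentence.toList.foldl pvStepNum (([] : List Char), true)).1
  else String.mk []

-- ===== PORT B =====
-- shared tail of B: cleaned = sentence without `drop`; parts = cleaned.split(sep); join the even-indexed parts
def pvSelect (sentence : String) (drop : Char) (sep : Char) : String :=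
  String.mk (PySem.Chars.join []
    (((PySem.List.enumerate ((sentence.toList.filter (fun c => c != drop)).splitOn sep)).filter
        (fun p => PySem.Int.mod p.1 2 == 0)).map Prod.snd))

def bracket_filter_alt (sentence : String) (mode : String) : String :=
  if mode == "phonetic" then pvSelect sentence ')' '('
  else if mode == "numeric" then pvSelect sentence '(' ')'
  else ""

-- ===== PRECONDITION & SPEC =====
def Spec_bracket_filter (sentence : String) (mode : String) (out : String) : Prop := out = bracket_filter_alt sentence mode
instance (sentence : String) (mode : String) (out : String) : Decidable (Spec_bracket_filter sentence mode out) := by unfold Spec_bracket_filter; infer_instance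

-- ===== CLAIM (what is proved, stated in full; the proofs are below) =====
def Claim_equal_bracket_filter : Prop := ∀ (sentence : String) (mode : String), Dom_bracket_filter sentence mode → Spec_bracket_filter sentence mode (bracket_filter sentence mode)

-- ===== LEMMAS AND PROOFS =====

-- characterisation of both loops: keep chars while `k`, `sep` toggles `k`, `drop` is skipped
def pvKeep (sep : Char) (drop : Char) : List Char → Bool → List Char
  | [], _ => []
  | c :: cs, k =>
    if c = sep then pvKeep sep drop cs (!k)
    else if c = drop then pvKeep sep drop cs k
    else if k then c :: pvKeep sep drop cs k else pvKeep sep drop cs k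

mutual
def pvEvens : List (List Char) → List Char
  | [] => []
  | p :: ps => p ++ pvOdds ps
def pvOdds : List (List Char) → List Char
  | [] => []
  | _ :: ps => pvEvens ps
end

lemma pvKeep_filter (sep drop : Char) (hne : sep ≠ drop) :
    ∀ (cs : List Char) (k : Bool),
      pvKeep sep drop cs k = pvKeep sep drop (cs.filter (fun c => c != drop)) k := by
  intro cs
  induction cs with
  | nil => intro k; rfl
  | cons c t ih =>
    intro k
    by_cases hd : c = drop
    · subst hd
      have h1 : c ≠ sep := fun h => hne h.symm
      simp [List.filter_cons, pvKeep, h1, ih]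
    · by_cases hs : c = sep <;> simp [List.filter_cons, pvKeep, hs, hd, ih, hne]

lemma pvKeep_splitOn (sep drop : Char) :
    ∀ (ds : List Char), drop ∉ ds →
      pvEvens (ds.splitOn sep) = pvKeep sep drop ds true ∧
      pvOdds (ds.splitOn sep) = pvKeep sep drop ds false := by
  intro ds
  induction ds with
  | nil => intro _; simp [List.splitOn, List.splitOnP_nil, pvEvens, pvOdds, pvKeep]
  | cons c t ih =>
    intro hnd
    have hcd : c ≠ drop := fun h => hnd (h ▸ List.mem_cons_self)
    have ih' := ih (fun h => hnd (List.mem_cons_of_mem _ h))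
    by_cases hs : c = sep
    · subst hs
      simp only [List.splitOn, List.splitOnP_cons, beq_self_eq_true] at *
      simpa [pvEvens, pvOdds, pvKeep, hcd] using ⟨ih'.2, ih'.1⟩
    · cases hsp : List.splitOnP (· == sep) t with
      | nil => exact absurd hsp (List.splitOnP_ne_nil _ t)
      | cons p ps =>
        simp only [List.splitOn, List.splitOnP_cons, hsp] at *
        simp [hs, pvEvens, pvOdds, pvKeep, hcd, ← ih'.1, ← ih'.2, List.modifyHead]

lemma pvJoin_flatten : ∀ ps : List (List Char), PySem.Chars.join [] ps = ps.flatten := by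
  intro ps
  induction ps with
  | nil => rfl
  | cons p t ih =>
    cases t with
    | nil => simp [PySem.Chars.join, List.intercalate]
    | cons q u =>
      simp only [PySem.Chars.join, List.intercalate] at *
      simp_all

lemma pvEnum_even (parts : List (List Char)) :
    ∀ s : Int,
      ((((PySem.List.enumerate parts s).filter (fun p => PySem.Int.mod p.1 2 == 0)).map Prod.snd).flatten
        = if PySem.Int.mod s 2 = 0 then pvEvens parts else pvOdds parts) := by
  induction parts with
  | nil => intro s; simp [PySem.List.enumerate, pvEvens, pvOdds]
  | cons p ps ih =>
    intro s
    have hs : PySem.Int.mod s 2 = s % 2 := PySem.Int.mod_eq_emod_of_pos (by norm_num)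
    have hs1 : PySem.Int.mod (s + 1) 2 = (s + 1) % 2 := PySem.Int.mod_eq_emod_of_pos (by norm_num)
    rw [PySem.List.enumerate_cons]
    by_cases h : PySem.Int.mod s 2 = 0
    · have hd2 : (2:Int) ∣ s := by rw [hs] at h; omega
      have hd2' : ¬ (2:Int) ∣ (s + 1) := by omega
      have IH := ih (s + 1)
      simp [hs1, hd2'] at IH
      simp [List.filter_cons, hd2, pvEvens, pvOdds, IH]
    · have hd2 : ¬ (2:Int) ∣ s := by rw [hs] at h; omega
      have hd2' : (2:Int) ∣ (s + 1) := by omega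
      have IH := ih (s + 1)
      simp [hs1, hd2'] at IH
      simp [List.filter_cons, hd2, pvEvens, pvOdds, IH]

lemma pvSelect_eq (sentence : String) (drop sep : Char) (hne : sep ≠ drop) :
    pvSelect sentence drop sep = String.mk (pvKeep sep drop sentence.toList true) := by
  unfold pvSelect
  rw [pvJoin_flatten, pvEnum_even]
  have hnotin : drop ∉ sentence.toList.filter (fun c => c != drop) := by
    intro h
    have := List.of_mem_filter h
    simp at this
  rw [if_pos (by decide), (pvKeep_splitOn sep drop _ hnotin).1, ← pvKeep_filter sep drop hne]

lemma pvLoopA_phonetic (cs : List Char) :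
    ∀ (acc : List Char) (flag : Bool),
      (cs.foldl pvStepPhon (acc, flag)).1 = acc ++ pvKeep '(' ')' cs (!flag) := by
  induction cs with
  | nil => intro acc flag; simp [pvKeep]
  | cons c t ih =>
    intro acc flag
    rw [List.foldl_cons]
    by_cases hc : c = '('
    · subst hc
      have hstep : ∀ fl, pvStepPhon (acc, fl) '(' = (acc, !fl) := by
        intro fl; cases fl <;> rfl
      rw [hstep, ih]
      simp [pvKeep]
    · by_cases hr : c = ')'
      · subst hr
        have hstep : ∀ fl, pvStepPhon (acc, fl) ')' = (acc, fl) := by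
          intro fl; cases fl <;> rfl
        rw [hstep, ih]
        simp [pvKeep]
      · cases flag with
        | false =>
          have hstep : pvStepPhon (acc, false) c = (acc ++ [c], false) := by
            simp [pvStepPhon, hc, hr]
          rw [hstep, ih]
          simp [pvKeep, hc, hr]
        | true =>
          have hstep : pvStepPhon (acc, true) c = (acc, true) := by
            simp [pvStepPhon, hc, hr]
          rw [hstep, ih]
          simp [pvKeep, hc, hr]

lemma pvLoopA_numeric (cs : List Char) :
    ∀ (acc : List Char) (upd : Bool),
      (cs.foldl pvStepNum (acc, upd)).1 = acc ++ pvKeep ')' '(' cs upd := by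
  induction cs with
  | nil => intro acc upd; simp [pvKeep]
  | cons c t ih =>
    intro acc upd
    rw [List.foldl_cons]
    by_cases hc : c = '('
    · subst hc
      have hstep : ∀ u, pvStepNum (acc, u) '(' = (acc, u) := by
        intro u; cases u <;> rfl
      rw [hstep, ih]
      simp [pvKeep]
    · by_cases hr : c = ')'
      · subst hr
        have hstep : ∀ u, pvStepNum (acc, u) ')' = (acc, !u) := by
          intro u; cases u <;> rfl
        rw [hstep, ih]
        simp [pvKeep]
      · cases upd with
        | true =>
          have hstep : pvStepNum (acc, true) c = (acc ++ [c], true) := by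
            simp [pvStepNum, hc, hr]
          rw [hstep, ih]
          simp [pvKeep, hc, hr]
        | false =>
          have hstep : pvStepNum (acc, false) c = (acc, false) := by
            simp [pvStepNum, hc, hr]
          rw [hstep, ih]
          simp [pvKeep, hc, hr]

-- ===== VERDICT (by name: the statement is the Claim_ definition above) =====
theorem bracket_filter_spec : Claim_equal_bracket_filter := by
  intro sentence mode _
  unfold Spec_bracket_filter bracket_filter bracket_filter_alt
  by_cases hp : mode == "phonetic"
  · rw [if_pos hp, if_pos hp, pvSelect_eq sentence ')' '(' (by decide),
      pvLoopA_phonetic sentence.toList [] false]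
    rfl
  · rw [if_neg hp, if_neg hp]
    by_cases hn : mode == "numeric"
    · rw [if_pos hn, if_pos hn, pvSelect_eq sentence '(' ')' (by decide),
        pvLoopA_numeric sentence.toList [] true]
      rfl
    · rw [if_neg hn, if_neg hn]
      rfl
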